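-- pv_equiv track=rewrite | github.com/BennyJane/algorithm_mad | leetcode/bisectionMethod/hIndex.py | hIndex2
-- ===== SOURCE A (Python) =====
-- from typing import List
--
-- def hIndex2(citations: List[int]) -> int:
--     n = len(citations)
--     left = 0
--     right = n - 1
--     ans = 0
--     while left <= right:
--         mid = int((left + right + 1) / 2)
--         right_len = n - mid
--         if citations[mid] >= right_len:
--             ans = max(ans, right_len)
--             right -= 1
--         else:
--             left += 1
--
--     return ans
-- ===== SOURCE B (Python) =====
-- def hIndex2(citations):
--     n = len(citations)
--     return sum(1 for i, c in enumerate(citations) if c >= n - i)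
-- ===== Notes on version B (the rewrite author's own statement) =====
-- stated objective: simpler
-- what changed: A runs a stateful shrinking-window loop moving left/right bounds one step at a time while accumulating a max; B is a single stateless counting pass: it counts the indices i with citations[i] >= n - i, which equals the h-index on the binary-search domain Pre_ (the predicate i -> citations[i] >= n-i monotone, implied by the intended sorted-ascending input); outside Pre_ A's window-shrinking value is path-dependent and accidental.
-- outside the precondition, e.g. on hIndex2([5, 0, 0]): A returns 0, B returns 1
import Mathlib
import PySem

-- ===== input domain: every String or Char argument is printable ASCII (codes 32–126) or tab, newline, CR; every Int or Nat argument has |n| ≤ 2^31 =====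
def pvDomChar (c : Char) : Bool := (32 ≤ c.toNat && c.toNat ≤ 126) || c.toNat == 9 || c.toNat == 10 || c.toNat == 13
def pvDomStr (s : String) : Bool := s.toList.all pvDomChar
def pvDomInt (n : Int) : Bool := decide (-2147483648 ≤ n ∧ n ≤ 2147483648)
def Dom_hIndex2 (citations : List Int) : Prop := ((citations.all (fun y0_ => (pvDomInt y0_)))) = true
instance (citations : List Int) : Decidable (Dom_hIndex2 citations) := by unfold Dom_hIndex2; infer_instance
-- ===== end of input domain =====

-- B replaces A's stateful shrinking-window loop by one stateless counting pass
-- (count of indices i with citations[i] ≥ n−i); equal on Pre_ (monotone predicate,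
-- implied by the intended sorted-ascending input).

-- ===== PORT A =====
-- while left <= right: mid = int((left+right+1)/2); ... (each iteration moves one bound by 1,
-- so the loop runs at most n times; fuel = n+1 is enough).  int((l+r+1)/2) truncates the exact
-- float quotient; inside the loop l+r+1 ≥ 0, where truncation = floor, so floordiv is exact.
def hIndex2Loop (xs : List Int) (n : Int) (fuel : Nat) (left right ans : Int) : Int :=
  match fuel with
  | 0 => ans
  | Nat.succ fuel =>
    if left ≤ right then
      let mid := PySem.Int.floordiv (left + right + 1) 2
      let rlen := n - mid
      match PySem.List.pyGet? xs mid with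
      | none => ans  -- unreachable: mid ∈ [left, right] ⊆ [0, n-1]
      | some v =>
        if rlen ≤ v then hIndex2Loop xs n fuel left (right - 1) (max ans rlen)
        else hIndex2Loop xs n fuel (left + 1) right ans
    else ans

def hIndex2 (citations : List Int) : Int :=
  let n : Int := citations.length
  hIndex2Loop citations n (citations.length + 1) 0 (n - 1) 0

-- ===== PORT B =====
-- return sum(1 for i, c in enumerate(citations) if c >= n - i): the sum of a 0/1
-- comprehension is the count of the enumerate pairs satisfying the test (countP).
def hIndex2_alt (citations : List Int) : Int :=
  let n : Int := citations.length
  ((PySem.List.enumerate citations 0).countP (fun p => decide (n - p.1 ≤ p.2)) : Int)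

-- ===== PRECONDITION & SPEC =====
-- Pre_ restricts to the function's natural domain (h-index II: citations sorted ascending,
-- which implies it): the predicate i ↦ (citations[i] ≥ n−i) is monotone
-- (false…false,true…true); outside it A's shrinking-window value is path-dependent.
def Pre_hIndex2 (citations : List Int) : Prop :=
  ∀ i, (hi : i < citations.length) → ∀ j, (hj : j < citations.length) → i ≤ j →
    (citations.length : Int) - (i : Int) ≤ citations[i] →
    (citations.length : Int) - (j : Int) ≤ citations[j]
instance (citations : List Int) : Decidable (Pre_hIndex2 citations) := by unfold Pre_hIndex2; infer_instance
def pvWitness_hIndex2 : List Int := [0, 1, 3, 5, 6]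

def Spec_hIndex2 (citations : List Int) (out : Int) : Prop := out = hIndex2_alt citations
instance (citations : List Int) (out : Int) : Decidable (Spec_hIndex2 citations out) := by unfold Spec_hIndex2; infer_instance

-- ===== CLAIM (what is proved, stated in full; the proofs are below) =====
def Claim_equal_hIndex2 : Prop := ∀ (citations : List Int), Dom_hIndex2 citations → Pre_hIndex2 citations → Spec_hIndex2 citations (hIndex2 citations)

-- ===== LEMMAS AND PROOFS =====

-- The common yardstick: first index i with citations[i] ≥ n - i (= xs.length if none).
-- A's loop computes n - pvF (proved below); B's count equals n - pvF because under Pre_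
-- the predicate is false…false,true…true along the list.
def pvQ (xs : List Int) : Int × Int → Bool :=
  fun p => decide ((xs.length : Int) - p.1 ≤ p.2)

def pvF (xs : List Int) : Nat :=
  (PySem.List.enumerate xs 0).findIdx (pvQ xs)

theorem pvF_le (xs : List Int) : pvF xs ≤ xs.length := by
  simpa [pvF, PySem.List.length_enumerate] using
    (List.findIdx_le_length (p := pvQ xs) (xs := PySem.List.enumerate xs 0))

theorem pvF_true (xs : List Int) (h : pvF xs < xs.length) :
    (xs.length : Int) - (pvF xs : Int) ≤ xs[pvF xs]'h := by
  have h' : pvF xs < (PySem.List.enumerate xs 0).length := by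
    simpa [PySem.List.length_enumerate] using h
  have := List.findIdx_getElem (w := h')
  simpa [pvF, pvQ, PySem.List.getElem_enumerate] using this

theorem pvF_false (xs : List Int) (i : Nat) (hi : i < xs.length) (h : i < pvF xs) :
    xs[i] < (xs.length : Int) - (i : Int) := by
  have h' : i < (PySem.List.enumerate xs 0).length := by
    simpa [PySem.List.length_enumerate] using hi
  have := List.not_of_lt_findIdx (xs := PySem.List.enumerate xs 0) (h := h)
  simp [pvQ, PySem.List.getElem_enumerate] at this
  omega

theorem pvF_least (xs : List Int) (i : Nat) (hi : i < xs.length)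
    (h : (xs.length : Int) - (i : Int) ≤ xs[i]) : pvF xs ≤ i := by
  by_contra hc
  have := pvF_false xs i hi (by omega)
  omega

theorem pvF_mono (xs : List Int) (hs : Pre_hIndex2 xs) (i : Nat) (hi : i < xs.length)
    (hFi : pvF xs ≤ i) : (xs.length : Int) - (i : Int) ≤ xs[i] := by
  have hF : pvF xs < xs.length := lt_of_le_of_lt hFi hi
  exact hs (pvF xs) hF i hi hFi (pvF_true xs hF)

-- Generic: on a list where the predicate, once true, stays true, the number of
-- true elements is the length minus the index of the first true element.
theorem countP_eq_length_sub_findIdx {α : Type} (q : α → Bool) :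
    ∀ (l : List α), l.Pairwise (fun a b => q a = true → q b = true) →
      l.countP q = l.length - l.findIdx q := by
  intro l
  induction l with
  | nil => simp
  | cons a t ih =>
    intro hp
    rcases List.pairwise_cons.mp hp with ⟨hhead, htail⟩
    by_cases hqa : q a = true
    · have hall : t.countP q = t.length := by
        rw [List.countP_eq_length]
        intro b hb; exact hhead b hb hqa
      simp [List.findIdx_cons, hqa, hall]
    · have hle := List.findIdx_le_length (p := q) (xs := t)
      simp only [List.countP_cons, List.findIdx_cons, hqa, ih htail, cond_false, Bool.false_eq_true, if_false,
        List.length_cons]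
      omega

theorem alt_eq (xs : List Int) (hs : Pre_hIndex2 xs) :
    hIndex2_alt xs = (xs.length : Int) - (pvF xs : Int) := by
  have hpair : (PySem.List.enumerate xs 0).Pairwise
      (fun a b => pvQ xs a = true → pvQ xs b = true) := by
    rw [List.pairwise_iff_getElem]
    intro i j hi hj hij
    simp only [PySem.List.length_enumerate] at hi hj
    simp only [PySem.List.getElem_enumerate, pvQ]
    intro h
    simp only [decide_eq_true_eq] at h ⊢
    have := hs i hi j hj (by omega) (by omega)
    omega
  have hc := countP_eq_length_sub_findIdx (pvQ xs) (PySem.List.enumerate xs 0) hpair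
  have hF := pvF_le xs
  simp only [PySem.List.length_enumerate] at hc
  unfold hIndex2_alt
  simp only [pvF] at hc hF ⊢
  rw [show (fun p : Int × Int => decide ((xs.length : Int) - p.1 ≤ p.2))
        = pvQ xs from rfl] at *
  rw [hc]
  omega

theorem hIndex2Loop_eq (xs : List Int) (hs : Pre_hIndex2 xs) :
    ∀ (fuel : Nat) (l r ans : Int), 0 ≤ l → l ≤ (pvF xs : Int) → (pvF xs : Int) ≤ r + 1 →
      r ≤ (xs.length : Int) - 1 → (r ≤ (pvF xs : Int) - 1 → (xs.length : Int) - (pvF xs : Int) ≤ ans) →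
      r - l + 1 ≤ (fuel : Int) →
      hIndex2Loop xs (xs.length : Int) fuel l r ans = max ans ((xs.length : Int) - (pvF xs : Int)) := by
  intro fuel
  induction fuel with
  | zero =>
    intro l r ans h0 hlF hFr hr hans hfuel
    simp only [hIndex2Loop]
    have : r ≤ (pvF xs : Int) - 1 := by omega
    have := hans this
    omega
  | succ k ih =>
    intro l r ans h0 hlF hFr hr hans hfuel
    by_cases hlr : l ≤ r
    · simp only [hIndex2Loop, if_pos hlr]
      have hmede : PySem.Int.floordiv (l + r + 1) 2 = (l + r + 1) / 2 :=
        PySem.Int.floordiv_eq_ediv_of_pos (by norm_num)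
      set mid := PySem.Int.floordiv (l + r + 1) 2 with hmid
      have hml : l ≤ mid := by omega
      have hmr : mid ≤ r := by omega
      have hmn : mid.toNat < xs.length := by omega
      have hget : PySem.List.pyGet? xs mid = some (xs[mid.toNat]'hmn) := by
        rw [PySem.List.pyGet?_of_nonneg xs (i := mid) (by omega), List.getElem?_eq_getElem hmn]
      rw [hget]
      simp only
      by_cases hpred : (xs.length : Int) - mid ≤ xs[mid.toNat]'hmn
      · rw [if_pos hpred]
        have hFm : (pvF xs : Int) ≤ mid := by
          have := pvF_least xs mid.toNat hmn (by omega)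
          omega
        rw [ih l (r - 1) (max ans ((xs.length : Int) - mid)) h0 hlF (by omega) (by omega)
          (by intro hcase; omega) (by omega)]
        omega
      · rw [if_neg hpred]
        have hmF : mid < (pvF xs : Int) := by
          by_contra hc
          have := pvF_mono xs hs mid.toNat hmn (by omega)
          push_cast at this
          omega
        exact ih (l + 1) r ans (by omega) (by omega) hFr hr hans (by omega)
    · simp only [hIndex2Loop, if_neg hlr]
      have : r ≤ (pvF xs : Int) - 1 := by omega
      have := hans this
      omega

-- ===== VERDICT (by name: the statement is the Claim_ definition above) =====
theorem hIndex2_spec : Claim_equal_hIndex2 := by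
  intro xs _ hpre
  unfold Spec_hIndex2 hIndex2
  have hF := pvF_le xs
  rw [hIndex2Loop_eq xs hpre (xs.length + 1) 0 ((xs.length : Int) - 1) 0 (by omega) (by omega)
    (by omega) (by omega) (by intro h; omega) (by omega)]
  rw [alt_eq xs hpre]
  omega
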